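-- pv_equiv track=rewrite | github.com/Varadabala/PYTHON | Day-6/reverse_digit.py | reverse_digits_punct
-- ===== SOURCE A (Python) =====
-- def reverse_digits_punct(s):
--
--     specials = []
--     for ch in s:
--         if not (('a' <= ch <= 'z') or ('A' <= ch <= 'Z')):
--             specials.append(ch)
--
--
--     specials = specials[::-1]
--
--
--     result = []
--     index = 0
--     for ch in s:
--         if not (('a' <= ch <= 'z') or ('A' <= ch <= 'Z')):
--             result.append(specials[index])
--             index += 1
--         else:
--             result.append(ch)
--
--     return ''.join(result)
-- ===== SOURCE B (Python) =====
-- def reverse_digits_punct(s):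
--     def is_letter(c):
--         return ('a' <= c <= 'z') or ('A' <= c <= 'Z')
--
--     arr = list(s)
--     pre, suf = [], []
--     i, j = 0, len(arr) - 1
--     # two pointers converging from both ends; the outermost pair of
--     # non-letters is emitted swapped, letters are emitted in place
--     while i < j:
--         if is_letter(arr[i]):
--             pre.append(arr[i])
--             i += 1
--         elif is_letter(arr[j]):
--             suf.append(arr[j])
--             j -= 1
--         else:
--             pre.append(arr[j])
--             suf.append(arr[i])
--             i += 1
--             j -= 1
--     return ''.join(pre + arr[i:j + 1] + suf[::-1])
-- ===== Notes on version B (the rewrite author's own statement) =====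
-- stated objective: alternative
-- what changed: Replaces A's three-pass collect/reverse/reinsert with a single recursion that converges from both ends of the string, swapping the outermost pair of non-letters at each step.
import Mathlib
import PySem

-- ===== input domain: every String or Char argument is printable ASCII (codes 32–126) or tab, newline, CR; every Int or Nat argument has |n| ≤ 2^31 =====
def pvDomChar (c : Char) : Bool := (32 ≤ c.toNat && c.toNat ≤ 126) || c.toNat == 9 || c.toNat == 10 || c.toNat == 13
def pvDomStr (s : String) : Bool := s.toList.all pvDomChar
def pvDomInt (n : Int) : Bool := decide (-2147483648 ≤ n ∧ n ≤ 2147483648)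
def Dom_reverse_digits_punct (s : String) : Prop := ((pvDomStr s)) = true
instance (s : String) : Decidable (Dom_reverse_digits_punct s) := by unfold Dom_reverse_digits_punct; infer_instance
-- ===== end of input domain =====

-- B changes A's three-pass collect/reverse/reinsert into one two-pointer pass converging from both ends (alternative decomposition, same cost).

-- letter test: ('a' <= ch <= 'z') or ('A' <= ch <= 'Z')
def pvIsLetter (c : Char) : Bool := ('a' ≤ c && c ≤ 'z') || ('A' ≤ c && c ≤ 'Z')

-- ===== PORT A =====
def reverse_digits_punct (s : String) : String :=
  -- specials = [ch for ch in s if not letter]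
  let specials := s.toList.foldl (fun acc ch => if !(pvIsLetter ch) then acc ++ [ch] else acc) []
  -- specials = specials[::-1]
  let specials := specials.reverse
  -- second pass: result.append(specials[index]); index += 1  (specials[index] is always in range)
  let r := s.toList.foldl
    (fun (p : List Char × Nat) ch =>
      if !(pvIsLetter ch) then (p.1 ++ [specials.getD p.2 ' '], p.2 + 1)
      else (p.1 ++ [ch], p.2)) ([], 0)
  String.mk r.1

-- ===== PORT B =====
-- while i < j: skip letters from either end, otherwise emit the swapped pair; pre/suf collect the output
def pvLoopB (arr : List Char) (i j : Nat) (pre suf : List Char) : List Char :=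
  if i < j then
    if pvIsLetter (arr.getD i ' ') then
      pvLoopB arr (i + 1) j (pre ++ [arr.getD i ' ']) suf
    else if pvIsLetter (arr.getD j ' ') then
      pvLoopB arr i (j - 1) pre (suf ++ [arr.getD j ' '])
    else
      pvLoopB arr (i + 1) (j - 1) (pre ++ [arr.getD j ' ']) (suf ++ [arr.getD i ' '])
  else
    -- pre + arr[i:j+1] + suf[::-1]   (i, j ≥ 0 here, so the slice is drop/take)
    pre ++ ((arr.drop i).take (j + 1 - i)) ++ suf.reverse
termination_by j + 1 - i
decreasing_by all_goals omega

def reverse_digits_punct_alt (s : String) : String :=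
  let arr := s.toList
  String.mk (pvLoopB arr 0 (arr.length - 1) [] [])

-- ===== PRECONDITION & SPEC =====
def Spec_reverse_digits_punct (s : String) (out : String) : Prop := out = reverse_digits_punct_alt s
instance (s : String) (out : String) : Decidable (Spec_reverse_digits_punct s out) := by unfold Spec_reverse_digits_punct; infer_instance

-- ===== CLAIM (what is proved, stated in full; the proofs are below) =====
def Claim_equal_reverse_digits_punct : Prop := ∀ (s : String), Dom_reverse_digits_punct s → Spec_reverse_digits_punct s (reverse_digits_punct s)

-- ===== LEMMAS AND PROOFS =====

-- the common specification: merge the letters of l with a supply sp of reversed specials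
def pvMerge : List Char → List Char → List Char
  | [], _ => []
  | c :: cs, sp =>
    if pvIsLetter c then c :: pvMerge cs sp
    else match sp with
      | [] => c :: pvMerge cs []
      | x :: xs => x :: pvMerge cs xs

def pvNL (c : Char) : Bool := !(pvIsLetter c)

def pvWfix (l : List Char) : List Char := pvMerge l ((l.filter pvNL).reverse)

theorem pvMerge_append (ys zs sp : List Char)
    (h : (ys.filter pvNL).length ≤ sp.length) :
    pvMerge (ys ++ zs) sp
      = pvMerge ys sp ++ pvMerge zs (sp.drop (ys.filter pvNL).length) := by
  induction ys generalizing sp with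
  | nil => simp [pvMerge]
  | cons c cs ih =>
    by_cases hc : pvIsLetter c
    · have hf : (c :: cs).filter pvNL = cs.filter pvNL := by
        simp [List.filter_cons, pvNL, hc]
      rw [hf] at h
      simp only [List.cons_append, pvMerge, if_pos hc, hf]
      rw [ih sp h]
    · have hfc : (List.filter pvNL (c :: cs)).length = (cs.filter pvNL).length + 1 := by
        simp [List.filter_cons, pvNL, hc]
      rw [hfc] at h
      match sp with
      | [] => simp at h
      | x :: xs =>
        simp only [List.cons_append, pvMerge, if_neg hc]
        rw [ih xs (by simp only [List.length_cons] at h; omega), hfc]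
        simp

theorem pvMerge_extra (m sp t : List Char)
    (h : (m.filter pvNL).length ≤ sp.length) :
    pvMerge m (sp ++ t) = pvMerge m sp := by
  induction m generalizing sp with
  | nil => simp [pvMerge]
  | cons c cs ih =>
    by_cases hc : pvIsLetter c
    · have hf : (c :: cs).filter pvNL = cs.filter pvNL := by
        simp [List.filter_cons, pvNL, hc]
      rw [hf] at h
      simp only [pvMerge, if_pos hc]
      rw [ih sp h]
    · have hfc : (List.filter pvNL (c :: cs)).length = (cs.filter pvNL).length + 1 := by
        simp [List.filter_cons, pvNL, hc]
      rw [hfc] at h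
      match sp with
      | [] => simp at h
      | x :: xs =>
        simp only [List.cons_append, pvMerge, if_neg hc]
        rw [ih xs (by simp only [List.length_cons] at h; omega)]

theorem pvWfix_nil : pvWfix [] = [] := by simp [pvWfix, pvMerge]

theorem pvWfix_single (c : Char) : pvWfix [c] = [c] := by
  by_cases hc : pvIsLetter c <;>
    simp [pvWfix, pvMerge, List.filter, pvNL, hc]

theorem pvWfix_cons_letter (c : Char) (cs : List Char) (hc : pvIsLetter c) :
    pvWfix (c :: cs) = c :: pvWfix cs := by
  simp [pvWfix, pvMerge, hc, List.filter_cons, pvNL]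

theorem pvWfix_snoc_letter (ys : List Char) (d : Char) (hd : pvIsLetter d) :
    pvWfix (ys ++ [d]) = pvWfix ys ++ [d] := by
  have hf : (ys ++ [d]).filter pvNL = ys.filter pvNL := by
    simp [List.filter_append, List.filter, pvNL, hd]
  have hlen : (ys.filter pvNL).length ≤ ((ys.filter pvNL).reverse).length := by simp
  simp only [pvWfix, hf]
  rw [pvMerge_append ys [d] _ hlen]
  simp [pvMerge, hd]

theorem pvWfix_swap (c d : Char) (m : List Char)
    (hc : ¬ pvIsLetter c) (hd : ¬ pvIsLetter d) :
    pvWfix (c :: m ++ [d]) = d :: pvWfix m ++ [c] := by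
  have hf : (c :: m ++ [d]).filter pvNL = c :: m.filter pvNL ++ [d] := by
    simp [List.filter_cons, List.filter_append, List.filter, pvNL, hc, hd]
  simp only [pvWfix, hf]
  have hrev : (c :: m.filter pvNL ++ [d]).reverse = d :: (m.filter pvNL).reverse ++ [c] := by
    simp
  rw [hrev]
  simp only [List.cons_append, pvMerge, if_neg hc]
  have hlen : (m.filter pvNL).length ≤ ((m.filter pvNL).reverse ++ [c]).length := by simp
  rw [pvMerge_append m [d] _ hlen]
  have hdrop : ((m.filter pvNL).reverse ++ [c]).drop (m.filter pvNL).length = [c] := by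
    rw [List.drop_append_of_le_length (by simp)]
    simp
  rw [hdrop]
  rw [pvMerge_extra m ((m.filter pvNL).reverse) [c] (by simp)]
  simp [pvMerge, hd]

-- ===== A equals the specification =====

theorem pvFoldFilter (l acc : List Char) :
    l.foldl (fun acc ch => if !(pvIsLetter ch) then acc ++ [ch] else acc) acc
      = acc ++ l.filter pvNL := by
  induction l generalizing acc with
  | nil => simp
  | cons c cs ih =>
    rw [List.foldl_cons]
    by_cases hc : pvIsLetter c
    · rw [if_neg (by simp [hc]), ih, List.filter_cons]
      simp [pvNL, hc]
    · rw [if_pos (by simp [hc]), ih, List.filter_cons]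
      simp [pvNL, hc]

theorem pvGetD (l : List Char) (i : Nat) (hi : i < l.length) :
    l.getD i ' ' = l[i] := by
  simp [List.getD, List.getElem?_eq_getElem hi]

theorem pvFoldA (l : List Char) (sp : List Char) (acc : List Char) (i : Nat)
    (h : i + (l.filter pvNL).length ≤ sp.length) :
    (l.foldl
      (fun (p : List Char × Nat) ch =>
        if !(pvIsLetter ch) then (p.1 ++ [sp.getD p.2 ' '], p.2 + 1)
        else (p.1 ++ [ch], p.2)) (acc, i)).1
      = acc ++ pvMerge l (sp.drop i) := by
  induction l generalizing acc i with
  | nil => simp [pvMerge]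
  | cons c cs ih =>
    rw [List.foldl_cons]
    by_cases hc : pvIsLetter c
    · have hf : (c :: cs).filter pvNL = cs.filter pvNL := by
        simp [List.filter_cons, pvNL, hc]
      rw [hf] at h
      have hstep : (if (!pvIsLetter c) = true then (acc ++ [sp.getD i ' '], i + 1)
          else (acc ++ [c], i)) = (acc ++ [c], i) := by simp [hc]
      rw [hstep, ih (acc ++ [c]) i h]
      simp [pvMerge, hc]
    · have hf : ((c :: cs).filter pvNL).length = (cs.filter pvNL).length + 1 := by
        simp [List.filter_cons, pvNL, hc]
      rw [hf] at h
      have hi : i < sp.length := by omega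
      have hstep : (if (!pvIsLetter c) = true then (acc ++ [sp.getD i ' '], i + 1)
          else (acc ++ [c], i)) = (acc ++ [sp.getD i ' '], i + 1) := by simp [hc]
      rw [hstep, ih (acc ++ [sp.getD i ' ']) (i + 1) (by omega)]
      have hdrop : sp.drop i = sp[i] :: sp.drop (i + 1) := List.drop_eq_getElem_cons hi
      rw [hdrop, pvGetD sp i hi]
      simp [pvMerge, hc]

theorem pvA_eq (s : String) : reverse_digits_punct s = String.mk (pvWfix s.toList) := by
  show String.mk
      ((s.toList.foldl
        (fun (p : List Char × Nat) ch =>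
          if !(pvIsLetter ch) then
            (p.1 ++ [((s.toList.foldl
                (fun acc ch => if !(pvIsLetter ch) then acc ++ [ch] else acc) []).reverse).getD p.2 ' '],
             p.2 + 1)
          else (p.1 ++ [ch], p.2)) ([], 0)).1)
    = String.mk (pvWfix s.toList)
  rw [pvFoldFilter s.toList [], List.nil_append]
  rw [pvFoldA s.toList ((s.toList.filter pvNL).reverse) [] 0 (by simp)]
  simp [pvWfix]

-- ===== B equals the specification =====

theorem pvLoopB_eq (arr : List Char) (i j : Nat) (pre suf : List Char)
    (hj : j < arr.length) :
    pvLoopB arr i j pre suf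
      = pre ++ pvWfix ((arr.drop i).take (j + 1 - i)) ++ suf.reverse := by
  induction i, j, pre, suf using pvLoopB.induct arr with
  | case1 i j pre suf hij hlet ih =>
    -- letter at i: window = arr[i] :: rest
    rw [pvLoopB, if_pos hij, if_pos hlet, ih hj]
    have hi : i < arr.length := by omega
    have hcons : (arr.drop i).take (j + 1 - i)
        = arr[i] :: (arr.drop (i + 1)).take (j + 1 - (i + 1)) := by
      rw [List.drop_eq_getElem_cons hi]
      have : j + 1 - i = (j + 1 - (i + 1)) + 1 := by omega
      rw [this, List.take_succ_cons]
    rw [hcons, pvWfix_cons_letter _ _ (by rwa [pvGetD arr i hi] at hlet)]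
    rw [pvGetD arr i hi]
    simp
  | case2 i j pre suf hij hleti hletj ih =>
    -- letter at j: window = front ++ [arr[j]]
    rw [pvLoopB, if_pos hij, if_neg hleti, if_pos hletj, ih (by omega)]
    have hsnoc : (arr.drop i).take (j + 1 - i)
        = (arr.drop i).take (j - 1 + 1 - i) ++ [arr[j]] := by
      have h1 : j + 1 - i = (j - i) + 1 := by omega
      rw [h1, List.take_succ]
      have h2 : (arr.drop i)[j - i]? = some arr[j] := by
        rw [List.getElem?_drop]
        have : i + (j - i) = j := by omega
        rw [this, List.getElem?_eq_getElem hj]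
      rw [h2]
      have : j - 1 + 1 - i = j - i := by omega
      rw [this]
      rfl
    rw [hsnoc, pvWfix_snoc_letter _ _ (by rwa [pvGetD arr j hj] at hletj)]
    rw [pvGetD arr j hj]
    simp
  | case3 i j pre suf hij hleti hletj ih =>
    -- both ends non-letters: window = arr[i] :: middle ++ [arr[j]]
    rw [pvLoopB, if_pos hij, if_neg hleti, if_neg hletj, ih (by omega)]
    have hi : i < arr.length := by omega
    have hwin : (arr.drop i).take (j + 1 - i)
        = arr[i] :: ((arr.drop (i + 1)).take (j - 1 + 1 - (i + 1)) ++ [arr[j]]) := by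
      rw [List.drop_eq_getElem_cons hi]
      have h1 : j + 1 - i = ((j - 1 + 1 - (i + 1)) + 1) + 1 := by omega
      rw [h1, List.take_succ_cons]
      congr 1
      rw [List.take_succ]
      have h2 : (arr.drop (i + 1))[j - 1 + 1 - (i + 1)]? = some arr[j] := by
        rw [List.getElem?_drop]
        have : i + 1 + (j - 1 + 1 - (i + 1)) = j := by omega
        rw [this, List.getElem?_eq_getElem hj]
      rw [h2]
      rfl
    rw [hwin]
    have hci : ¬ pvIsLetter arr[i] := by rwa [pvGetD arr i hi] at hleti
    have hcj : ¬ pvIsLetter arr[j] := by rwa [pvGetD arr j hj] at hletj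
    have hsw := pvWfix_swap arr[i] arr[j] ((arr.drop (i + 1)).take (j - 1 + 1 - (i + 1))) hci hcj
    simp only [List.cons_append] at hsw
    rw [hsw, pvGetD arr i hi, pvGetD arr j hj]
    simp
  | case4 i j pre suf hij =>
    -- i ≥ j: window is empty or a single character
    rw [pvLoopB, if_neg hij]
    rcases Nat.lt_or_ge j (i + 1) with h | h
    · rcases Nat.eq_or_lt_of_le (Nat.not_lt.mp hij) with h0 | h0
      · -- i = j : singleton window
        have h1 : j + 1 - i = 1 := by omega
        have hi : i < arr.length := by omega
        have h2 : List.take 1 (List.drop i arr) = [arr[i]] := by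
          rw [List.drop_eq_getElem_cons hi]
          rfl
        rw [h1, h2, pvWfix_single]
      · -- i > j : empty window
        have h1 : j + 1 - i = 0 := by omega
        rw [h1]
        simp [pvWfix_nil]
    · omega

theorem pvB_eq (s : String) : reverse_digits_punct_alt s = String.mk (pvWfix s.toList) := by
  show String.mk (pvLoopB s.toList 0 (s.toList.length - 1) [] []) = String.mk (pvWfix s.toList)
  match h : s.toList with
  | [] => simp [pvLoopB, pvWfix_nil]
  | c :: cs =>
    have hj : (c :: cs).length - 1 < (c :: cs).length := by simp
    rw [pvLoopB_eq (c :: cs) 0 ((c :: cs).length - 1) [] [] hj]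
    have : (c :: cs).length - 1 + 1 - 0 = (c :: cs).length := by simp
    simp [this]

-- ===== VERDICT (by name: the statement is the Claim_ definition above) =====
theorem reverse_digits_punct_spec : Claim_equal_reverse_digits_punct := by
  intro s _
  unfold Spec_reverse_digits_punct
  rw [pvA_eq, pvB_eq]
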